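-- pv_equiv track=rewrite | github.com/siinanXD/MaintanaceAIsisst | app/services/document_service.py | score_from_findings
-- ===== SOURCE A (Python) =====
-- def score_from_findings(findings):
--     """Return a quality score from review findings."""
--     score = 100
--     for finding in findings:
--         if finding["severity"] == "critical":
--             score -= 20
--         elif finding["severity"] == "warning":
--             score -= 10
--     return max(0, min(100, score))
-- ===== SOURCE B (Python) =====
-- def score_from_findings(findings):
--     """Return a quality score from review findings."""
--     criticals = sum(1 for f in findings if f["severity"] == "critical")
--     warnings = sum(1 for f in findings if f["severity"] == "warning")
--     return max(0, min(100, 100 - 20 * criticals - 10 * warnings))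
-- ===== Notes on version B (the rewrite author's own statement) =====
-- stated objective: alternative
-- what changed: Replaces the running subtracting accumulator with a one-pass-per-category tally (counts of critical and warning findings) followed by a closed-form score 100 - 20*criticals - 10*warnings, clamped once.
import Mathlib
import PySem

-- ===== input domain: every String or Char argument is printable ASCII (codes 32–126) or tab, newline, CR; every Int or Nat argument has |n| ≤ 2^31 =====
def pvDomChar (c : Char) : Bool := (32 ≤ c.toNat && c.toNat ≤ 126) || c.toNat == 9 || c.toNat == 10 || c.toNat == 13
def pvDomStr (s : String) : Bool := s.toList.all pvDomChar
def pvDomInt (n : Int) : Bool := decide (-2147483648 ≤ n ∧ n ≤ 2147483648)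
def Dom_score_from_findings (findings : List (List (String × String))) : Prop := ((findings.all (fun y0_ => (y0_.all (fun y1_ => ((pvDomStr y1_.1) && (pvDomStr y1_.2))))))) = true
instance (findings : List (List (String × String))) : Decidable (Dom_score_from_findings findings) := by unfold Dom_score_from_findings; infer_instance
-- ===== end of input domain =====

-- B replaces A's running subtracting accumulator with per-category counts and a
-- closed-form clamped score (objective: alternative decomposition, same O(n) cost).

-- ===== PORT A =====
-- finding["severity"]: first-match lookup in the association list; the .getD ""
-- branch is unreachable under Pre_ (Python raises KeyError there).
def pySeverity (f : List (String × String)) : String :=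
  ((f.find? (fun kv => kv.1 == "severity")).map Prod.snd).getD ""

def score_from_findings (findings : List (List (String × String))) : Int :=
  let score := findings.foldl (fun score finding =>
    if pySeverity finding == "critical" then score - 20
    else if pySeverity finding == "warning" then score - 10
    else score) 100
  max 0 (min 100 score)

-- ===== PORT B =====
def score_from_findings_alt (findings : List (List (String × String))) : Int :=
  let criticals : Int := (findings.countP (fun f => pySeverity f == "critical") : Nat)
  let warnings : Int := (findings.countP (fun f => pySeverity f == "warning") : Nat)
  max 0 (min 100 (100 - 20 * criticals - 10 * warnings))

-- ===== PRECONDITION & SPEC =====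
-- Pre_ excludes findings missing the "severity" key, on which Python A (and B) raise KeyError.
def Pre_score_from_findings (findings : List (List (String × String))) : Prop :=
  (findings.all (fun f => f.any (fun kv => kv.1 == "severity"))) = true
instance (findings : List (List (String × String))) : Decidable (Pre_score_from_findings findings) := by unfold Pre_score_from_findings; infer_instance
def pvWitness_score_from_findings : (List (List (String × String))) :=
  [[("severity", "critical")], [("severity", "info")]]

def Spec_score_from_findings (findings : List (List (String × String))) (out : Int) : Prop := out = score_from_findings_alt findings
instance (findings : List (List (String × String))) (out : Int) : Decidable (Spec_score_from_findings findings out) := by unfold Spec_score_from_findings; infer_instance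

-- ===== CLAIM (what is proved, stated in full; the proofs are below) =====
def Claim_equal_score_from_findings : Prop := ∀ (findings : List (List (String × String))), Dom_score_from_findings findings → Pre_score_from_findings findings → Spec_score_from_findings findings (score_from_findings findings)

-- ===== LEMMAS AND PROOFS =====
theorem score_fold_eq (l : List (List (String × String))) (s : Int) :
    l.foldl (fun score finding =>
      if pySeverity finding == "critical" then score - 20
      else if pySeverity finding == "warning" then score - 10
      else score) s
    = s - 20 * (l.countP (fun f => pySeverity f == "critical") : Nat)
        - 10 * (l.countP (fun f => pySeverity f == "warning") : Nat) := by
  induction l generalizing s with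
  | nil => simp
  | cons hd tl ih =>
    simp only [List.foldl_cons, List.countP_cons, ih]
    by_cases hc : pySeverity hd == "critical"
    · have hw : (pySeverity hd == "warning") = false := by
        simp_all
      simp only [hc, hw, if_true, if_false, Bool.false_eq_true]
      push_cast; ring
    · by_cases hw : pySeverity hd == "warning" <;>
        simp only [hc, hw, if_true, if_false, Bool.false_eq_true] <;>
        (push_cast; ring)

-- ===== VERDICT (by name: the statement is the Claim_ definition above) =====
theorem score_from_findings_spec : Claim_equal_score_from_findings := by
  intro findings _ _
  unfold Spec_score_from_findings score_from_findings score_from_findings_alt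
  simp only [score_fold_eq]
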